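-- pv_equiv track=rewrite | github.com/geun-00/coding-test | 프로그래머스/5/49190. 방의 개수/방의 개수.py | solution
-- ===== SOURCE A (Python) =====
-- def solution(arrows):
--
--     dx = (-1, -1, 0, 1, 1, 1, 0, -1)
--     dy = (0, 1, 1, 1, 0, -1, -1, -1)
--
--     class Node:
--         def __init__(self, x, y):
--             self.x = x
--             self.y = y
--             self.id = f"{x},{y}"
--             self.connected_node = set()
--
--     count = 0
--     map = {}
--     v = Node(0, 0)
--     map[v.id] = v
--
--     for d in arrows:
--         for _ in range(2):
--
--             x = v.x + dx[d]
--             y = v.y + dy[d]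
--             id = f"{x},{y}"
--
--             if id not in map:
--                 map[id] = Node(x, y)
--             elif id not in v.connected_node:
--                 count += 1
--
--             u = map[id]
--
--             v.connected_node.add(u.id)
--             u.connected_node.add(v.id)
--
--             v = u
--
--     return count
-- ===== SOURCE B (Python) =====
-- def solution(arrows):
--     # Build the walk's graph (vertices + canonical undirected edges), then
--     # return cyclomatic number E - V + 1 of the connected walk graph.
--     dx = (-1, -1, 0, 1, 1, 1, 0, -1)
--     dy = (0, 1, 1, 1, 0, -1, -1, -1)
--     cur = (0, 0)
--     vertices = {cur}
--     edges = set()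
--     for d in arrows:
--         for _ in range(2):
--             nxt = (cur[0] + dx[d], cur[1] + dy[d])
--             vertices.add(nxt)
--             edges.add((cur, nxt) if cur < nxt else (nxt, cur))
--             cur = nxt
--     return len(edges) - len(vertices) + 1
-- ===== Notes on version B (the rewrite author's own statement) =====
-- stated objective: simpler
-- what changed: Instead of A's node objects with per-node adjacency sets and a counter incremented on each new edge between existing nodes, B just collects the set of visited points and the set of canonical undirected edges and returns len(edges) - len(vertices) + 1, the cyclomatic number of the (always connected) walk graph.
import Mathlib
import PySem

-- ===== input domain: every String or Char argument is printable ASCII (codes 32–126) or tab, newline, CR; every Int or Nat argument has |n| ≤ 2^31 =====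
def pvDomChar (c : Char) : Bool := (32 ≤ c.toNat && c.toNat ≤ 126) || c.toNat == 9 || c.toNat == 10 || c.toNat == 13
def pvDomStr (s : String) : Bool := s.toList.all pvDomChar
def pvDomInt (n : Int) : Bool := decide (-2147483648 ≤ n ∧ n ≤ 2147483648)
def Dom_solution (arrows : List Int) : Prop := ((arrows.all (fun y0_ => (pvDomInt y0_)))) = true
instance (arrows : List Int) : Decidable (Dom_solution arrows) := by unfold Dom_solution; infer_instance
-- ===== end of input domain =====

-- B counts vertices and canonical edges of the walk graph and returns E - V + 1
-- (the cyclomatic number of the connected walk graph) instead of A's per-node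
-- adjacency bookkeeping with an incremental counter; objective: simpler.

-- ===== PORT A =====
def pvDxA : List Int := [-1, -1, 0, 1, 1, 1, 0, -1]
def pvDyA : List Int := [0, 1, 1, 1, 0, -1, -1, -1]

-- Python's Node carries (x, y), the id string f"{x},{y}" and the set of neighbour
-- ids.  The id string is an injective encoding of the pair (x, y), so it is ported
-- as the pair itself: the dict maps each node's id-pair to its connected-id set
-- (x and y are the key's components, so no separate record is needed).  Python
-- mutates the shared node objects; that aliasing is modelled by writing both
-- updated adjacency sets back into the dict.  State = (count, map, v.id).
def pvHalfA (st : Int × PySem.Dict (Int × Int) (PySem.Set (Int × Int)) × (Int × Int)) (d : Int) :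
    Int × PySem.Dict (Int × Int) (PySem.Set (Int × Int)) × (Int × Int) :=
  let count := st.1
  let map := st.2.1
  let v := st.2.2
  let x := v.1 + PySem.List.pyGetD pvDxA d 0
  let y := v.2 + PySem.List.pyGetD pvDyA d 0
  let id := (x, y)
  let vconn := map.getD v PySem.Set.empty
  let cm : Int × PySem.Dict (Int × Int) (PySem.Set (Int × Int)) :=
    if map.contains id = false then (count, map.insert id PySem.Set.empty)
    else if id ∉ vconn then (count + 1, map)
    else (count, map)
  let uconn := cm.2.getD id PySem.Set.empty
  let map2 := (cm.2.insert v (PySem.Set.add vconn id)).insert id (PySem.Set.add uconn v)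
  (cm.1, map2, id)

def solution (arrows : List Int) : Int :=
  (arrows.foldl (fun st d => pvHalfA (pvHalfA st d) d)
      (0, PySem.Dict.insert PySem.Dict.empty ((0:Int), (0:Int)) PySem.Set.empty,
       ((0:Int), (0:Int)))).1

-- ===== PORT B =====
def pvDxB : List Int := [-1, -1, 0, 1, 1, 1, 0, -1]
def pvDyB : List Int := [0, 1, 1, 1, 0, -1, -1, -1]

-- Python tuple '<' on int pairs is lexicographic.
def pvLtPair (p q : Int × Int) : Bool :=
  decide (p.1 < q.1) || (decide (p.1 = q.1) && decide (p.2 < q.2))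

-- State = (cur, vertices, edges); edges stored as '<'-sorted pairs.
def pvHalfB (st : (Int × Int) × PySem.Set (Int × Int) × PySem.Set ((Int × Int) × (Int × Int)))
    (d : Int) :
    (Int × Int) × PySem.Set (Int × Int) × PySem.Set ((Int × Int) × (Int × Int)) :=
  let cur := st.1
  let nxt := (cur.1 + PySem.List.pyGetD pvDxB d 0, cur.2 + PySem.List.pyGetD pvDyB d 0)
  (nxt, PySem.Set.add st.2.1 nxt,
   PySem.Set.add st.2.2 (if pvLtPair cur nxt then (cur, nxt) else (nxt, cur)))

def solution_alt (arrows : List Int) : Int :=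
  let st := arrows.foldl (fun st d => pvHalfB (pvHalfB st d) d)
      (((0:Int), (0:Int)), PySem.Set.ofList [((0:Int), (0:Int))], PySem.Set.empty)
  (st.2.2.length : Int) - (st.2.1.length : Int) + 1

-- ===== PRECONDITION & SPEC =====
-- Pre_ excludes exactly the arrows outside -8..7, on which Python A raises
-- IndexError reading dx[d] (negative indices down to -8 wrap, as in both ports).
def Pre_solution (arrows : List Int) : Prop := ∀ d ∈ arrows, -8 ≤ d ∧ d ≤ 7
instance (arrows : List Int) : Decidable (Pre_solution arrows) := by
  unfold Pre_solution; infer_instance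
def pvWitness_solution : List Int := [0, 1, 6, 6, 6, 4, 4, 2, 2, 2]

def Spec_solution (arrows : List Int) (out : Int) : Prop := out = solution_alt arrows
instance (arrows : List Int) (out : Int) : Decidable (Spec_solution arrows out) := by
  unfold Spec_solution; infer_instance

-- ===== CLAIM (what is proved, stated in full; the proofs are below) =====
def Claim_equal_solution : Prop :=
  ∀ (arrows : List Int), Dom_solution arrows → Pre_solution arrows →
    Spec_solution arrows (solution arrows)

-- ===== LEMMAS AND PROOFS =====

def pvCanon (p q : Int × Int) : (Int × Int) × (Int × Int) :=
  if pvLtPair p q then (p, q) else (q, p)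
lemma pvCanon_def (p q : Int × Int) :
    (if pvLtPair p q then (p, q) else (q, p)) = pvCanon p q := rfl
lemma pvCanon_cases (p q : Int × Int) : pvCanon p q = (p, q) ∨ pvCanon p q = (q, p) := by
  unfold pvCanon; split_ifs <;> simp
lemma pvCanon_comm (p q : Int × Int) : pvCanon p q = pvCanon q p := by
  rcases p with ⟨p1, p2⟩; rcases q with ⟨q1, q2⟩
  unfold pvCanon pvLtPair
  simp only [Bool.or_eq_true, Bool.and_eq_true, decide_eq_true_eq]
  split_ifs <;> simp_all [Prod.ext_iff] <;> omega
lemma pvCanon_eq_iff (p n q r : Int × Int) :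
    pvCanon q r = pvCanon p n ↔ (q = p ∧ r = n) ∨ (q = n ∧ r = p) := by
  constructor
  · intro h
    rcases pvCanon_cases q r with hqr | hqr <;> rcases pvCanon_cases p n with hpn' | hpn' <;>
      rw [hqr, hpn'] at h <;> simp [Prod.ext_iff] at h ⊢ <;> tauto
  · rintro (⟨hq, hr⟩ | ⟨hq, hr⟩)
    · rw [hq, hr]
    · rw [hq, hr, pvCanon_comm]
lemma pvDelta_ne (d : Int) (hd : -8 ≤ d ∧ d ≤ 7) :
    ¬(PySem.List.pyGetD pvDxA d 0 = 0 ∧ PySem.List.pyGetD pvDyA d 0 = 0) := by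
  obtain ⟨h1, h2⟩ := hd
  interval_cases d <;> decide
def pvInv (a : Int × PySem.Dict (Int × Int) (PySem.Set (Int × Int)) × (Int × Int))
    (b : (Int × Int) × PySem.Set (Int × Int) × PySem.Set ((Int × Int) × (Int × Int))) : Prop :=
  a.2.2 = b.1 ∧ b.1 ∈ b.2.1 ∧ a.2.1.keys = b.2.1 ∧
  a.1 = (b.2.2.length : Int) - (b.2.1.length : Int) + 1 ∧
  (∀ q r, r ∈ a.2.1.getD q PySem.Set.empty ↔ pvCanon q r ∈ b.2.2) ∧
  (∀ e ∈ b.2.2, e.1 ∈ b.2.1 ∧ e.2 ∈ b.2.1)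

lemma pvStep (d : Int) (hd : -8 ≤ d ∧ d ≤ 7) (a b) (h : pvInv a b) :
    pvInv (pvHalfA a d) (pvHalfB b d) := by
  obtain ⟨c, m, v⟩ := a
  obtain ⟨cur, vs, es⟩ := b
  obtain ⟨hv, hcur, hkeys, hcount, hedge, hend⟩ := h
  dsimp only at hv hcur hkeys hcount hedge hend
  subst hv
  unfold pvHalfA pvHalfB
  dsimp only
  simp only [show pvDxB = pvDxA from rfl, show pvDyB = pvDyA from rfl]
  rw [pvCanon_def]
  set n : Int × Int := (v.1 + PySem.List.pyGetD pvDxA d 0, v.2 + PySem.List.pyGetD pvDyA d 0) with hn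
  have hpn : v ≠ n := by
    intro hvn
    apply pvDelta_ne d hd
    rw [hn] at hvn
    rcases v with ⟨v1, v2⟩
    simp [Prod.ext_iff] at hvn
    omega
  have hvk : m.contains v = true := by
    rw [PySem.Dict.contains_iff_mem_keys, hkeys]; exact hcur
  by_cases hmem : n ∈ vs
  · -- n already a vertex
    have hcont : m.contains n = true := by
      rw [PySem.Dict.contains_iff_mem_keys, hkeys]; exact hmem
    rw [hcont, if_neg (show ¬(true = false) by simp)]
    have hvsadd : PySem.Set.add vs n = vs := PySem.Set.add_of_mem hmem
    by_cases hconn : n ∈ m.getD v PySem.Set.empty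
    · -- edge already present
      rw [if_neg (show ¬(n ∉ m.getD v PySem.Set.empty) from not_not_intro hconn)]
      have hes : PySem.Set.add es (pvCanon v n) = es :=
        PySem.Set.add_of_mem ((hedge v n).mp hconn)
      refine ⟨rfl, ?_, ?_, ?_, ?_, ?_⟩
      · dsimp only; rw [hvsadd]; exact hmem
      · dsimp only
        rw [hvsadd,
          PySem.Dict.keys_insert_of_contains _ _
            (by rw [PySem.Dict.contains_insert, hcont]; simp),
          PySem.Dict.keys_insert_of_contains _ _ hvk]
        exact hkeys
      · dsimp only; rw [hvsadd, hes]; exact hcount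
      · dsimp only
        rw [hes]
        intro q r
        rw [PySem.Dict.getD_insert, PySem.Dict.getD_insert]
        by_cases hqn : q = n
        · rw [if_pos hqn, hqn, PySem.Set.mem_add]
          constructor
          · rintro (hr | hr)
            · exact (hedge n r).mp hr
            · rw [hr, pvCanon_comm n v]; exact (hedge v n).mp hconn
          · intro hr; left; exact (hedge n r).mpr hr
        · rw [if_neg hqn]
          by_cases hqv : q = v
          · rw [if_pos hqv, hqv, PySem.Set.mem_add]
            constructor
            · rintro (hr | hr)
              · exact (hedge v r).mp hr
              · rw [hr]; exact (hedge v n).mp hconn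
            · intro hr; left; exact (hedge v r).mpr hr
          · rw [if_neg hqv]; exact hedge q r
      · dsimp only; rw [hvsadd, hes]; exact hend
    · -- new edge between existing vertices: count += 1
      rw [if_pos hconn]
      have hnes : pvCanon v n ∉ es := fun hc => hconn ((hedge v n).mpr hc)
      have hes : PySem.Set.add es (pvCanon v n) = es ++ [pvCanon v n] :=
        PySem.Set.add_of_not_mem hnes
      refine ⟨rfl, ?_, ?_, ?_, ?_, ?_⟩
      · dsimp only; rw [hvsadd]; exact hmem
      · dsimp only
        rw [hvsadd,
          PySem.Dict.keys_insert_of_contains _ _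
            (by rw [PySem.Dict.contains_insert, hcont]; simp),
          PySem.Dict.keys_insert_of_contains _ _ hvk]
        exact hkeys
      · dsimp only
        rw [hvsadd, hes, List.length_append, List.length_singleton]
        push_cast
        omega
      · dsimp only
        rw [hes]
        intro q r
        rw [PySem.Dict.getD_insert, PySem.Dict.getD_insert]
        rw [List.mem_append, List.mem_singleton, pvCanon_eq_iff]
        by_cases hqn : q = n
        · rw [if_pos hqn, hqn, PySem.Set.mem_add]
          constructor
          · rintro (hr | hr)
            · left; exact (hedge n r).mp hr
            · right; right; exact ⟨rfl, hr⟩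
          · rintro (hr | ⟨hnv, _⟩ | ⟨_, hr⟩)
            · left; exact (hedge n r).mpr hr
            · exact absurd hnv.symm hpn
            · right; exact hr
        · rw [if_neg hqn]
          by_cases hqv : q = v
          · rw [if_pos hqv, hqv, PySem.Set.mem_add]
            constructor
            · rintro (hr | hr)
              · left; exact (hedge v r).mp hr
              · right; left; exact ⟨rfl, hr⟩
            · rintro (hr | ⟨_, hr⟩ | ⟨hvn, _⟩)
              · left; exact (hedge v r).mpr hr
              · right; exact hr
              · exact absurd hvn hpn
          · rw [if_neg hqv]
            rw [hedge q r]
            constructor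
            · intro hr; left; exact hr
            · rintro (hr | ⟨hq, _⟩ | ⟨hq, _⟩)
              · exact hr
              · exact absurd hq hqv
              · exact absurd hq hqn
      · dsimp only
        rw [hvsadd, hes]
        intro e he
        rcases List.mem_append.mp he with he | he
        · exact hend e he
        · rw [List.mem_singleton] at he
          rw [he]
          rcases pvCanon_cases v n with hc | hc <;> rw [hc] <;> exact ⟨by assumption, by assumption⟩
  · -- first visit of n: new vertex and new edge, count unchanged
    have hcont : m.contains n = false :=
      Bool.eq_false_iff.mpr
        (fun hc => hmem (hkeys ▸ (PySem.Dict.contains_iff_mem_keys m n).mp hc))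
    rw [hcont, if_pos rfl]
    have hvs' : PySem.Set.add vs n = vs ++ [n] := PySem.Set.add_of_not_mem hmem
    have hnes : pvCanon v n ∉ es := by
      intro hc
      have h2 := hend _ hc
      rcases pvCanon_cases v n with h | h <;> rw [h] at h2
      · exact hmem h2.2
      · exact hmem h2.1
    have hes : PySem.Set.add es (pvCanon v n) = es ++ [pvCanon v n] :=
      PySem.Set.add_of_not_mem hnes
    refine ⟨rfl, ?_, ?_, ?_, ?_, ?_⟩
    · dsimp only
      rw [hvs']
      exact List.mem_append_right _ (List.mem_singleton.mpr rfl)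
    · dsimp only
      rw [hvs',
        PySem.Dict.keys_insert_of_contains _ _
          (by rw [PySem.Dict.contains_insert, PySem.Dict.contains_insert]; simp),
        PySem.Dict.keys_insert_of_contains _ _
          (by rw [PySem.Dict.contains_insert, hvk]; simp),
        PySem.Dict.keys_insert_of_not_contains _ _ hcont, hkeys]
    · dsimp only
      rw [hvs', hes, List.length_append, List.length_append, List.length_singleton,
        List.length_singleton]
      push_cast
      omega
    · dsimp only
      intro q r
      rw [hes, PySem.Dict.getD_insert,
        List.mem_append, List.mem_singleton, pvCanon_eq_iff]
      by_cases hqn : q = n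
      · rw [if_pos hqn, hqn, PySem.Dict.getD_insert_self, PySem.Set.mem_add]
        constructor
        · rintro (h0 | hr)
          · simp at h0
          · right; right; exact ⟨rfl, hr⟩
        · rintro (hr | ⟨hnv, _⟩ | ⟨_, hr⟩)
          · exfalso
            have h2 := hend _ hr
            rcases pvCanon_cases n r with h | h <;> rw [h] at h2
            · exact hmem h2.1
            · exact hmem h2.2
          · exact absurd hnv.symm hpn
          · right; exact hr
      · rw [if_neg hqn, PySem.Dict.getD_insert]
        by_cases hqv : q = v
        · rw [if_pos hqv, hqv, PySem.Set.mem_add]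
          constructor
          · rintro (hr | hr)
            · left; exact (hedge v r).mp hr
            · right; left; exact ⟨rfl, hr⟩
          · rintro (hr | ⟨_, hr⟩ | ⟨hvn, _⟩)
            · left; exact (hedge v r).mpr hr
            · right; exact hr
            · exact absurd hvn hpn
        · rw [if_neg hqv, PySem.Dict.getD_insert, if_neg hqn, hedge q r]
          constructor
          · intro hr; left; exact hr
          · rintro (hr | ⟨hq, _⟩ | ⟨hq, _⟩)
            · exact hr
            · exact absurd hq hqv
            · exact absurd hq hqn
    · dsimp only
      rw [hvs', hes]
      intro e he
      rcases List.mem_append.mp he with he | he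
      · obtain ⟨h1, h2⟩ := hend e he
        exact ⟨List.mem_append_left _ h1, List.mem_append_left _ h2⟩
      · rw [List.mem_singleton] at he
        rw [he]
        rcases pvCanon_cases v n with hc | hc <;> rw [hc]
        · exact ⟨List.mem_append_left _ hcur,
            List.mem_append_right _ (List.mem_singleton.mpr rfl)⟩
        · exact ⟨List.mem_append_right _ (List.mem_singleton.mpr rfl),
            List.mem_append_left _ hcur⟩

lemma pvInv_init :
    pvInv (0, PySem.Dict.insert PySem.Dict.empty ((0:Int), (0:Int)) PySem.Set.empty,
           ((0:Int), (0:Int)))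
      (((0:Int), (0:Int)), PySem.Set.ofList [((0:Int), (0:Int))], PySem.Set.empty) := by
  refine ⟨rfl, by decide, by decide, by decide, ?_, ?_⟩
  · intro q r
    constructor
    · intro h
      rw [PySem.Dict.getD_insert] at h
      split_ifs at h with h1
      · simp [PySem.Set.empty] at h
      · rw [PySem.Dict.getD_empty] at h
        simp [PySem.Set.empty] at h
    · intro h
      simp [PySem.Set.empty] at h
  · intro e he
    simp [PySem.Set.empty] at he

lemma pvFold (l : List Int) (hl : ∀ d ∈ l, -8 ≤ d ∧ d ≤ 7) :
    ∀ a b, pvInv a b →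
      pvInv (l.foldl (fun st d => pvHalfA (pvHalfA st d) d) a)
        (l.foldl (fun st d => pvHalfB (pvHalfB st d) d) b) := by
  induction l with
  | nil => intro a b h; exact h
  | cons x xs ih =>
      intro a b h
      have hx := hl x (List.mem_cons_self ..)
      exact ih (fun d hd => hl d (List.mem_cons_of_mem _ hd)) _ _
        (pvStep x hx _ _ (pvStep x hx _ _ h))

-- ===== VERDICT (by name: the statement is the Claim_ definition above) =====
theorem solution_spec : Claim_equal_solution := by
  intro arrows _ hpre
  have h := pvFold arrows hpre _ _ pvInv_init
  unfold Spec_solution solution solution_alt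
  exact h.2.2.2.1
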